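-- pv_equiv track=rewrite | github.com/Dav1com/CC3101-trabajo-1 | main.py | comprimirVariables
-- ===== SOURCE A (Python) =====
-- def comprimirVariables(formula):
--     compresion = {}
--     k = 0
--     numVars = 0
--     for i in formula:
--         for j in i:
--             if not (abs(j) in compresion):
--                 compresion[abs(j)] = k
--                 k += 1
--             numVars = max(numVars, abs(j))
--     return compresion, numVars
-- ===== SOURCE B (Python) =====
-- def comprimirVariables(formula):
--     flat = [abs(j) for clause in formula for j in clause]
--     numVars = max(flat, default=0)
--     first = {}
--     for pos, v in reversed(list(enumerate(flat))):
--         first[v] = pos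
--     compresion = {v: r for r, v in enumerate(sorted(first, key=first.get))}
--     return compresion, numVars
-- ===== Notes on version B (the rewrite author's own statement) =====
-- stated objective: alternative
-- what changed: B replaces A's fused loop (incremental first-seen index counter plus running max) by a sort-then-rank scheme: a backwards overwrite pass records each distinct abs value's first-occurrence position, the distinct values are sorted by that position, and ranks are assigned by enumeration; the max is a separate pass.
import Mathlib
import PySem

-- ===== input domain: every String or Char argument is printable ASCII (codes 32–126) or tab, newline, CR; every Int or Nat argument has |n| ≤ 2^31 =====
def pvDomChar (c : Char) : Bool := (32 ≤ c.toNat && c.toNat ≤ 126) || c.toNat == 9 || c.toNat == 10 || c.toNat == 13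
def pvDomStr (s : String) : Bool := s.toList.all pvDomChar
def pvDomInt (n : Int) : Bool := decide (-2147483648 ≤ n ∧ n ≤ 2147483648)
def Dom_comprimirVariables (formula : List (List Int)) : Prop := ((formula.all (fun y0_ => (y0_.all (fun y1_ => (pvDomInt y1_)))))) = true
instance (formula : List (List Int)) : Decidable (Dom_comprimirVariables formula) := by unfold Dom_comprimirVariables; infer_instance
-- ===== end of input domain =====

-- B replaces A's fused first-seen-counter loop by a sort-then-rank scheme: a backwards pass
-- records first-occurrence positions, the distinct values are sorted by position and ranked.

-- ===== PORT A =====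
def comprimirVariables (formula : List (List Int)) : (List (Int × Int)) × Int :=
  let st := formula.foldl (fun (s : PySem.Dict Int Int × Int × Int) i =>
      i.foldl (fun (s : PySem.Dict Int Int × Int × Int) j =>
        let s1 := if s.1.contains |j| = false then (s.1.insert |j| s.2.1, s.2.1 + 1, s.2.2) else s
        (s1.1, s1.2.1, max s1.2.2 |j|)) s)
    ((PySem.Dict.empty : PySem.Dict Int Int), (0 : Int), (0 : Int))
  (st.1.items, st.2.2)

-- ===== PORT B =====
-- 'sorted(first, key=first.get)' is ported with key (first.get? v).getD 0: every sorted element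
-- is a key of 'first', on which Python's first.get returns exactly that int (exact here).
def comprimirVariables_alt (formula : List (List Int)) : (List (Int × Int)) × Int :=
  let flat := formula.flatMap (fun clause => clause.map (fun j => |j|))
  let numVars := (PySem.List.max? flat (fun x => x)).getD 0
  let first := ((PySem.List.enumerate flat 0).reverse).foldl
      (fun (d : PySem.Dict Int Int) p => d.insert p.2 p.1) PySem.Dict.empty
  let order := PySem.List.sorted first.keys (fun v => (first.get? v).getD 0) false
  let compresion := (PySem.List.enumerate order 0).foldl
      (fun (d : PySem.Dict Int Int) p => d.insert p.2 p.1) PySem.Dict.empty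
  (compresion.items, numVars)

-- ===== PRECONDITION & SPEC =====
def Spec_comprimirVariables (formula : List (List Int)) (out : (List (Int × Int)) × Int) : Prop := out = comprimirVariables_alt formula
instance (formula : List (List Int)) (out : (List (Int × Int)) × Int) : Decidable (Spec_comprimirVariables formula out) := by unfold Spec_comprimirVariables; infer_instance

-- ===== CLAIM (what is proved, stated in full; the proofs are below) =====
def Claim_equal_comprimirVariables : Prop := ∀ (formula : List (List Int)), Dom_comprimirVariables formula → Spec_comprimirVariables formula (comprimirVariables formula)

-- ===== LEMMAS AND PROOFS =====

-- A's inner loop body, on the already-absolute value v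
def pvStepA (s : PySem.Dict Int Int × Int × Int) (v : Int) : PySem.Dict Int Int × Int × Int :=
  let s1 := if s.1.contains v = false then (s.1.insert v s.2.1, s.2.1 + 1, s.2.2) else s
  (s1.1, s1.2.1, max s1.2.2 v)

theorem pv_dedup_append (xs : List Int) (v : Int) :
    PySem.List.dedup (xs ++ [v]) =
      if v ∈ PySem.List.dedup xs then PySem.List.dedup xs else PySem.List.dedup xs ++ [v] := by
  simp only [PySem.List.dedup, PySem.Set.ofList, List.foldl_append, List.foldl_cons, List.foldl_nil]
  simp [PySem.Set.add]

theorem pv_any_enum (u : List Int) (v : Int) (s : Int) :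
    ((List.map (fun p => (p.2, p.1)) (PySem.List.enumerate u s)).any fun p => p.1 == v)
      = decide (v ∈ u) := by
  induction u generalizing s with
  | nil => simp [PySem.List.enumerate]
  | cons x t ih =>
    simp only [PySem.List.enumerate, List.map_cons, List.any_cons, ih, List.mem_cons]
    by_cases h : x = v
    · simp [h]
    · simp [h, Ne.symm h]

-- Invariant of A's fused loop over the flat abs-value sequence: the dict is the enumerated
-- ordered dedup of what was seen, k is its size, numVars the running max from 0.
theorem pv_inv (xs : List Int) :
    xs.foldl pvStepA ((PySem.Dict.empty : PySem.Dict Int Int), (0 : Int), (0 : Int)) =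
      (PySem.Dict.mk ((PySem.List.enumerate (PySem.List.dedup xs) 0).map (fun p => (p.2, p.1))),
        ((PySem.List.dedup xs).length : Int), xs.foldl max 0) := by
  induction xs using List.reverseRecOn with
  | nil => rfl
  | append_singleton xs v ih =>
    rw [List.foldl_append, List.foldl_cons, List.foldl_nil, ih, pv_dedup_append,
        List.foldl_append, List.foldl_cons, List.foldl_nil]
    by_cases hv : v ∈ PySem.List.dedup xs
    · simp only [pvStepA, PySem.Dict.contains_mk, pv_any_enum, hv, decide_true]
      simp
    · simp only [pvStepA, PySem.Dict.contains_mk, pv_any_enum, hv, decide_false,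
        PySem.Dict.insert, if_true]
      simp [PySem.List.enumerate_append, PySem.List.enumerate]

theorem pv_flat (formula : List (List Int)) :
    formula.flatMap (fun clause => clause.map (fun j => |j|)) = (formula.flatten).map (fun j => |j|) := by
  induction formula with
  | nil => rfl
  | cons c t ih => simp [ih]

theorem pv_max (xs : List Int) (h : ∀ a ∈ xs, 0 ≤ a) :
    (PySem.List.max? xs (fun x => x)).getD 0 = xs.foldl max 0 := by
  cases xs with
  | nil => rfl
  | cons x t =>
    rw [PySem.List.max?_id_cons, List.foldl_cons]
    have : max 0 x = x := max_eq_right (h x (by simp))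
    simp [this]

theorem pv_b_items (u : List Int) (hnd : u.Nodup) :
    ((PySem.List.enumerate u 0).foldl (fun (d : PySem.Dict Int Int) p => d.insert p.2 p.1)
      PySem.Dict.empty).items = (PySem.List.enumerate u 0).map (fun p => (p.2, p.1)) := by
  have h := PySem.Dict.items_foldl_insert_fresh (l := PySem.List.enumerate u 0)
    (k := fun p => p.2) (v := fun p => p.1) (d := (PySem.Dict.empty : PySem.Dict Int Int))
    (by intro a _; rfl)
    (by rw [PySem.List.map_snd_enumerate]; exact hnd)
  simpa using h

-- lookup in the backwards-built dict: the LAST insert processed for key v is the FIRST pair of m with snd v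
theorem pv_get_rev_fold (m : List (Int × Int)) (d : PySem.Dict Int Int) (v : Int) :
    (m.reverse.foldl (fun (d : PySem.Dict Int Int) p => d.insert p.2 p.1) d).get? v =
      match m.find? (fun p => p.2 == v) with
      | some p => some p.1
      | none => d.get? v := by
  induction m generalizing d with
  | nil => rfl
  | cons p t ih =>
    rw [List.reverse_cons, List.foldl_append, List.foldl_cons, List.foldl_nil, List.find?_cons]
    by_cases h : p.2 = v
    · simp only [h, BEq.rfl]
      rw [PySem.Dict.get?_insert, if_pos rfl]
    · have : (p.2 == v) = false := by simpa using h
      rw [this]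
      rw [PySem.Dict.get?_insert, if_neg (Ne.symm h), ih]

-- find? over an enumeration locates the first occurrence at offset idxOf
theorem pv_find_enum (xs : List Int) (v : Int) (s : Int) (hv : v ∈ xs) :
    (PySem.List.enumerate xs s).find? (fun p => p.2 == v) = some (s + (xs.idxOf v : Int), v) := by
  induction xs generalizing s with
  | nil => cases hv
  | cons x t ih =>
    rw [PySem.List.enumerate_cons, List.find?_cons]
    by_cases h : x = v
    · simp [h, List.idxOf_cons_self]
    · have hb : (x == v) = false := by simpa using h
      have hv' : v ∈ t := List.mem_of_ne_of_mem (fun e => h e.symm) hv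
      rw [hb, ih (s + 1) hv', List.idxOf_cons_ne _ h]
      have : (s + 1) + ((t.idxOf v : Nat) : Int) = s + (((t.idxOf v).succ : Nat) : Int) := by
        push_cast; ring
      rw [this]

-- first occurrences of distinct values appear in dedup-order
theorem pv_dedup_pairwise_idx (xs : List Int) :
    (PySem.List.dedup xs).Pairwise (fun a b => (xs.idxOf a : Int) < (xs.idxOf b : Int)) := by
  induction xs using List.reverseRecOn with
  | nil => simp [PySem.List.dedup, PySem.Set.ofList]
  | append_singleton xs v ih =>
    rw [pv_dedup_append]
    have hidx : ∀ a ∈ PySem.List.dedup xs, (xs ++ [v]).idxOf a = xs.idxOf a := by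
      intro a ha
      exact List.idxOf_append_of_mem ((PySem.List.mem_dedup _ _).mp ha)
    have hkeep : (PySem.List.dedup xs).Pairwise
        (fun a b => ((xs ++ [v]).idxOf a : Int) < ((xs ++ [v]).idxOf b : Int)) := by
      refine List.Pairwise.imp_of_mem ?_ ih
      intro a b ha hb h
      rw [hidx a ha, hidx b hb]; exact h
    by_cases hv : v ∈ PySem.List.dedup xs
    · rw [if_pos hv]; exact hkeep
    · rw [if_neg hv, List.pairwise_append]
      refine ⟨hkeep, by simp, ?_⟩
      intro a ha b hb
      rw [List.mem_singleton] at hb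
      rw [hb, hidx a ha]
      have hvxs : v ∉ xs := fun h => hv ((PySem.List.mem_dedup _ _).mpr h)
      have h1 : (xs ++ [v]).idxOf v = xs.length := by
        rw [List.idxOf_append_of_notMem hvxs]; simp
      rw [h1]
      have : xs.idxOf a < xs.length := List.idxOf_lt_length_of_mem ((PySem.List.mem_dedup _ _).mp ha)
      exact_mod_cast this

def pvFirst (xs : List Int) : PySem.Dict Int Int :=
  ((PySem.List.enumerate xs 0).reverse).foldl
    (fun (d : PySem.Dict Int Int) p => d.insert p.2 p.1) PySem.Dict.empty

theorem pv_first_get (xs : List Int) (v : Int) (hv : v ∈ xs) :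
    (pvFirst xs).get? v = some ((xs.idxOf v : Int)) := by
  rw [pvFirst, pv_get_rev_fold, pv_find_enum xs v 0 hv]
  simp

theorem pv_first_keys_perm (xs : List Int) : (PySem.List.dedup xs).Perm (pvFirst xs).keys := by
  have hk : (pvFirst xs).keys
      = PySem.Set.ofList ((PySem.List.enumerate xs 0).reverse.map (fun p => p.2)) := by
    have := PySem.Dict.keys_foldl_insert_key (l := (PySem.List.enumerate xs 0).reverse)
      (key := fun p : Int × Int => p.2) (f := fun (d : PySem.Dict Int Int) (p : Int × Int) => p.1)
      (d := (PySem.Dict.empty : PySem.Dict Int Int))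
    simpa [pvFirst, PySem.Set.update, PySem.Set.ofList] using this
  have hmap : (PySem.List.enumerate xs 0).reverse.map (fun p : Int × Int => p.2) = xs.reverse := by
    rw [List.map_reverse, PySem.List.map_snd_enumerate]
  rw [hk, hmap]
  refine (List.perm_ext_iff_of_nodup (PySem.List.nodup_dedup xs) (PySem.Set.nodup_ofList _)).mpr ?_
  intro a
  rw [PySem.List.mem_dedup, ← PySem.List.dedup_eq_ofList, PySem.List.mem_dedup, List.mem_reverse]

-- B's sorted order is exactly the ordered dedup: the dedup is a strictly key-increasing
-- rearrangement of the dict's keys, so sorting names it.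
theorem pv_order (xs : List Int) :
    PySem.List.sorted (pvFirst xs).keys (fun v => ((pvFirst xs).get? v).getD 0) false
      = PySem.List.dedup xs := by
  refine PySem.List.sorted_eq_of_perm_of_pairwise_lt _ _ _ (pv_first_keys_perm xs) ?_
  refine List.Pairwise.imp_of_mem ?_ (pv_dedup_pairwise_idx xs)
  intro a b ha hb h
  rw [pv_first_get xs a ((PySem.List.mem_dedup _ _).mp ha),
      pv_first_get xs b ((PySem.List.mem_dedup _ _).mp hb)]
  simp only [Option.getD_some]
  exact h


-- ===== VERDICT (by name: the statement is the Claim_ definition above) =====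
theorem comprimirVariables_spec : Claim_equal_comprimirVariables := by
  intro formula _
  show comprimirVariables formula = comprimirVariables_alt formula
  have hA : comprimirVariables formula
      = ((((formula.flatten).map (fun j => |j|)).foldl pvStepA
            ((PySem.Dict.empty : PySem.Dict Int Int), (0 : Int), (0 : Int))).1.items,
         (((formula.flatten).map (fun j => |j|)).foldl pvStepA
            ((PySem.Dict.empty : PySem.Dict Int Int), (0 : Int), (0 : Int))).2.2) := by
    rw [List.foldl_map, List.foldl_flatten]
    rfl
  rw [hA, pv_inv]
  show _ = comprimirVariables_alt formula
  simp only [comprimirVariables_alt]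
  rw [pv_flat]
  set flat := (formula.flatten).map (fun j => |j|) with hflatdef
  have hfirst : ((PySem.List.enumerate flat 0).reverse).foldl
      (fun (d : PySem.Dict Int Int) p => d.insert p.2 p.1) PySem.Dict.empty = pvFirst flat := rfl
  rw [hfirst, pv_order, pv_b_items _ (PySem.List.nodup_dedup _),
      pv_max _ (by intro a ha; rw [hflatdef] at ha; simp only [List.mem_map] at ha; obtain ⟨c, _, rfl⟩ := ha; positivity)]
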